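-- pv_equiv track=rewrite | github.com/Fans-xmu/news_popularity_prediction | Netbaseline/data_process/4_creat_dataset.py | changetime_list
-- ===== SOURCE A (Python) =====
-- def changetime_list(time_lists):
--     timedict={}
--     time2id=time_lists
--     time2id.sort()
--     for i in range(len(time2id)):
--         timedict[time2id[i]]=i+1
--     time_fin=[timedict[idx] for idx in time_lists]
--     return time_fin
-- ===== SOURCE B (Python) =====
-- def changetime_list(time_lists):
--     # sorts time_lists in place (as A does); single pass over runs of equal values
--     time_lists.sort()
--     n = len(time_lists)
--     out = []
--     i = 0
--     while i < n:
--         j = i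
--         while j + 1 < n and time_lists[j + 1] == time_lists[i]:
--             j += 1
--         out.extend([j + 1] * (j + 1 - i))
--         i = j + 1
--     return out
-- ===== Notes on version B (the rewrite author's own statement) =====
-- stated objective: alternative
-- what changed: Replaces A's value-to-rank dict (one loop building it, a second comprehension looking every element up) by a single run-length pass over the sorted list that emits, for each maximal run of equal values, its last 1-based index repeated run-length times.
import Mathlib
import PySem

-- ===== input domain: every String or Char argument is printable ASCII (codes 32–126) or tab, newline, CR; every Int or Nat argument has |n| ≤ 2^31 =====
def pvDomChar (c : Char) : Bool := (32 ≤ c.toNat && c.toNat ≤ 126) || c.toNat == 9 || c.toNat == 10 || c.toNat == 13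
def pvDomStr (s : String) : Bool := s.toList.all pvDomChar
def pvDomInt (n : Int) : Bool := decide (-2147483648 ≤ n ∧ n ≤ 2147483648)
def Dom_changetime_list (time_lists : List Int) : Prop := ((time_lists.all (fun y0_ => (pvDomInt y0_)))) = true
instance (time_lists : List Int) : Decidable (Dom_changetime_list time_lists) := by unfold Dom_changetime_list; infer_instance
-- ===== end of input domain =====

-- B replaces A's value→rank dict (built in one pass, looked up in a second) by a single
-- run-length pass over the sorted list; same return value, "alternative" objective.
-- NOTE: both Pythons sort the argument list IN PLACE (A via the alias time2id, B directly);
-- the equivalence proved here is about the RETURN value, and both perform the same mutation.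

-- ===== PORT A =====
-- time2id aliases time_lists and is sorted in place, so the final comprehension
-- iterates the SORTED list. timedict[idx] never raises (every element of the sorted
-- list was inserted as a key), so Dict.getD is exact here.
def changetime_list (time_lists : List Int) : List Int :=
  let time2id := PySem.List.sorted time_lists (fun x => x) false
  let timedict := (PySem.List.pyRange 0 (PySem.List.len time2id) 1).foldl
      (fun d i => PySem.Dict.insert d (PySem.List.pyGetD time2id i 0) (i + 1))
      PySem.Dict.empty
  time2id.map (fun idx => PySem.Dict.getD timedict idx 0)

-- ===== PORT B =====
-- Source B's outer while-loop = recursion on the remaining suffix (starting at absolute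
-- index pos); its inner while-scan for the end of the run of equal values = takeWhile/
-- dropWhile; out.extend([j+1]*(j+1-i)) = List.replicate.
def altRuns (s : List Int) (pos : Int) : List Int :=
  match s with
  | [] => []
  | v :: rest =>
      let eqs := rest.takeWhile (fun w => w == v)
      let rest' := rest.dropWhile (fun w => w == v)
      let r := pos + (eqs.length : Int) + 1
      List.replicate (eqs.length + 1) r ++ altRuns rest' r
termination_by s.length
decreasing_by
  have := List.length_dropWhile_le (fun w => w == v) rest
  simp only [List.length_cons]; omega

def changetime_list_alt (time_lists : List Int) : List Int :=
  altRuns (PySem.List.sorted time_lists (fun x => x) false) 0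

-- ===== PRECONDITION & SPEC =====
def Spec_changetime_list (time_lists : List Int) (out : List Int) : Prop := out = changetime_list_alt time_lists
instance (time_lists : List Int) (out : List Int) : Decidable (Spec_changetime_list time_lists out) := by unfold Spec_changetime_list; infer_instance

-- ===== CLAIM (what is proved, stated in full; the proofs are below) =====
def Claim_equal_changetime_list : Prop := ∀ (time_lists : List Int), Dom_changetime_list time_lists → Spec_changetime_list time_lists (changetime_list time_lists)

-- ===== LEMMAS AND PROOFS =====

-- A's dict lookup on a sorted list: last write wins, so the rank of v is the number of
-- elements ≤ v.
lemma dict_lookup_sorted (s : List Int) :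
    s.Pairwise (· ≤ ·) → ∀ v ∈ s,
    PySem.Dict.getD
      ((PySem.List.enumerate s 0).foldl
        (fun d p => PySem.Dict.insert d p.2 (p.1 + 1)) PySem.Dict.empty) v 0
      = (s.countP (fun w => decide (w ≤ v)) : Int) := by
  induction s using List.reverseRecOn with
  | nil => intro _ v hv; simp at hv
  | append_singleton t a IH =>
    intro hs v hv
    rw [List.pairwise_append] at hs
    obtain ⟨ht, -, hcross⟩ := hs
    rw [PySem.List.enumerate_append, List.foldl_append]
    simp only [PySem.List.enumerate_cons, PySem.List.enumerate_nil, List.foldl_cons,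
      List.foldl_nil]
    rw [PySem.Dict.getD_insert]
    by_cases hva : v = a
    · subst hva
      simp only [List.countP_append]
      have h1 : t.countP (fun w => decide (w ≤ v)) = t.length :=
        List.countP_eq_length.2 (fun w hw => by
          simpa using hcross w hw v (by simp))
      have h2 : [v].countP (fun w => decide (w ≤ v)) = 1 := by simp
      rw [h1, h2]; push_cast; ring
    · rw [if_neg hva]
      have hvt : v ∈ t := by
        rcases List.mem_append.1 hv with h | h
        · exact h
        · simp at h; exact absurd h hva
      have hva' : v < a := lt_of_le_of_ne (hcross v hvt a (by simp)) hva
      rw [IH ht v hvt, List.countP_append]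
      have : [a].countP (fun w => decide (w ≤ v)) = 0 := by
        simp; omega
      rw [this]; simp

-- B's run pass on a sorted suffix starting at absolute index pos computes the same ranks.
lemma altRuns_eq_map (n : Nat) : ∀ (s : List Int), s.length ≤ n → s.Pairwise (· ≤ ·) →
    ∀ pos : Int,
    altRuns s pos = s.map (fun u => pos + (s.countP (fun w => decide (w ≤ u)) : Int)) := by
  induction n with
  | zero =>
    intro s hlen _ pos
    have hs : s = [] := List.eq_nil_of_length_eq_zero (Nat.le_zero.1 hlen)
    subst hs; simp [altRuns]
  | succ n IH =>
    intro s hlen hs pos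
    match s with
    | [] => simp [altRuns]
    | v :: rest =>
      rw [altRuns]
      set eqs := rest.takeWhile (fun w => w == v) with heqs_def
      set rest' := rest.dropWhile (fun w => w == v) with hrest'_def
      have hsplit : eqs ++ rest' = rest := List.takeWhile_append_dropWhile
      have heqv : ∀ w ∈ eqs, w = v := by
        intro w hw
        have := List.mem_takeWhile_imp hw
        simpa using this
      rw [List.pairwise_cons] at hs
      obtain ⟨hvle, hrest⟩ := hs
      have hrest' : rest'.Pairwise (· ≤ ·) :=
        hrest.sublist (List.dropWhile_sublist _)
      have hgt : ∀ w ∈ rest', v < w := by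
        intro w hw
        obtain ⟨h, tl, hre⟩ : ∃ h tl, rest' = h :: tl := by
          cases hcase : rest' with
          | nil => rw [hcase] at hw; simp at hw
          | cons h tl => exact ⟨h, tl, rfl⟩
        have hne : rest.dropWhile (fun w => w == v) ≠ [] := by
          rw [← hrest'_def, hre]; simp
        have hre2 : List.dropWhile (fun w => w == v) rest = h :: tl := by
          rw [← hrest'_def]; exact hre
        have hhp := List.head_dropWhile_not (fun w => w == v) hne
        have hhead : (rest.dropWhile (fun w => w == v)).head hne = h := by
          simp only [hre2, List.head_cons]
        rw [hhead] at hhp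
        have hhv : h ≠ v := by simpa using hhp
        have hmem2 : h ∈ rest' := by rw [hre]; simp
        have hhr : h ∈ rest := (List.dropWhile_sublist (fun w => w == v)).mem hmem2
        have hvh : v < h := lt_of_le_of_ne (hvle h hhr) (Ne.symm hhv)
        rw [hre] at hw
        rcases List.mem_cons.1 hw with h1 | h1
        · subst h1; exact hvh
        · have : h ≤ w := by
            rw [hre] at hrest'
            exact (List.pairwise_cons.1 hrest').1 w h1
          omega
      have hc_eqs : eqs.countP (fun w => decide (w ≤ v)) = eqs.length :=
        List.countP_eq_length.2 (fun w hw => by simp [heqv w hw])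
      have hc_rest' : rest'.countP (fun w => decide (w ≤ v)) = 0 := by
        rw [List.countP_eq_zero]
        intro w hw; simp; exact hgt w hw
      have hc0 : (v :: rest).countP (fun w => decide (w ≤ v)) = eqs.length + 1 := by
        rw [← hsplit]
        simp [List.countP_append, hc_eqs, hc_rest']
      have hrlen : rest'.length ≤ n := by
        have h1 := List.length_dropWhile_le (fun w => w == v) rest
        simp only [List.length_cons] at hlen
        rw [← hrest'_def] at h1
        omega
      have hIH := IH rest' hrlen hrest' (pos + (eqs.length : Int) + 1)
      set f := fun u => pos + ((v :: rest).countP (fun w => decide (w ≤ u)) : Int) with hf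
      have hmap1 : (v :: eqs).map f
          = List.replicate (eqs.length + 1) (pos + (eqs.length : Int) + 1) := by
        apply List.eq_replicate_iff.2
        constructor
        · simp
        · intro b hb
          rcases List.mem_map.1 hb with ⟨u, hu, hub⟩
          have huv : u = v := by
            rcases List.mem_cons.1 hu with h1 | h1
            · exact h1
            · exact heqv u h1
          subst huv
          rw [hf] at hub
          simp only [hc0] at hub
          push_cast at hub
          omega
      have hmap2 : rest'.map f = altRuns rest' (pos + (eqs.length : Int) + 1) := by
        rw [hIH]
        apply List.map_congr_left
        intro u hu
        have hvu : v < u := hgt u hu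
        have hceqs : eqs.countP (fun w => decide (w ≤ u)) = eqs.length :=
          List.countP_eq_length.2 (fun w hw => by
            have := heqv w hw; subst this; simp; omega)
        have hcrest : rest.countP (fun w => decide (w ≤ u))
            = eqs.length + rest'.countP (fun w => decide (w ≤ u)) := by
          rw [← hsplit, List.countP_append, hceqs]
        have hcons : (v :: rest).countP (fun w => decide (w ≤ u))
            = rest.countP (fun w => decide (w ≤ u)) + 1 := by
          rw [List.countP_cons]
          simp [le_of_lt hvu]
        rw [hf]
        simp only [hcons, hcrest]
        push_cast
        ring
      rw [show v :: rest = (v :: eqs) ++ rest' by rw [List.cons_append, hsplit],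
        List.map_append, hmap1, hmap2]

-- ===== VERDICT (by name: the statement is the Claim_ definition above) =====
theorem changetime_list_spec : Claim_equal_changetime_list := by
  intro ts _
  unfold Spec_changetime_list changetime_list changetime_list_alt
  simp only []
  set s := PySem.List.sorted ts (fun x => x) false with hs_def
  have hs : s.Pairwise (· ≤ ·) := by
    have := PySem.List.sorted_pairwise ts (fun x => x)
    simpa using this
  have hd : (PySem.List.pyRange 0 (PySem.List.len s) 1).foldl
      (fun d i => PySem.Dict.insert d (PySem.List.pyGetD s i 0) (i + 1))
      PySem.Dict.empty
      = (PySem.List.enumerate s 0).foldl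
        (fun d p => PySem.Dict.insert d p.2 (p.1 + 1)) PySem.Dict.empty := by
    rw [PySem.List.enumerate_eq_map_pyRange (d := 0), List.foldl_map]
  rw [hd]
  rw [altRuns_eq_map s.length s le_rfl hs 0]
  apply List.map_congr_left
  intro v hv
  rw [dict_lookup_sorted s hs v hv]
  simp
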